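-- pv_equiv track=rewrite | github.com/tangyixuan/RADAR | stop_round_stats.py | order_keys
-- ===== SOURCE A (Python) =====
-- from collections import Counter, defaultdict
-- from typing import Dict, Iterable, Tuple
--
-- ROUND_ORDER = ["opening", "rebuttal", "closing", "no_stop", "unknown"]
--
-- def order_keys(counter: Counter) -> Iterable[str]:
--     seen = set()
--     for key in ROUND_ORDER:
--         if counter.get(key):
--             seen.add(key)
--             yield key
--     for key in sorted(counter):
--         if key not in seen:
--             yield key
-- ===== SOURCE B (Python) =====
-- ROUND_ORDER = ["opening", "rebuttal", "closing", "no_stop", "unknown"]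
--
-- def order_keys(counter):
--     idx = {k: i for i, k in enumerate(ROUND_ORDER)}
--     yield from sorted(
--         counter,
--         key=lambda k: ((idx[k] if k in idx and counter[k] else len(ROUND_ORDER)), k),
--     )
-- ===== Notes on version B (the rewrite author's own statement) =====
-- stated objective: idiomatic
-- what changed: A's two output loops with a 'seen' set (first scan ROUND_ORDER for truthy keys, then scan all sorted keys skipping seen ones) are replaced by a single sorted() pass over the keys with a composite (priority-index, key) sort key.
import Mathlib
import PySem

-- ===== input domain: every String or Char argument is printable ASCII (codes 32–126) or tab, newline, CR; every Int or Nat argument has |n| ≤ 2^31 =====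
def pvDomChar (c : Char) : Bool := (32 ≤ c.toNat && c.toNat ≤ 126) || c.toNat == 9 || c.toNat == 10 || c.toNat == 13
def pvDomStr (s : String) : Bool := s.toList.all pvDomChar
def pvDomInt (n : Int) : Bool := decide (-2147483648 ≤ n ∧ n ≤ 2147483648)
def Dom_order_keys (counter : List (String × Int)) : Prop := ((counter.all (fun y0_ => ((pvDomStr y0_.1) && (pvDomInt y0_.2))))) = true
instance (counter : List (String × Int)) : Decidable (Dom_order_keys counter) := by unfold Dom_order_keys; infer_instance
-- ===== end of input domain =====

-- B replaces A's two output loops and 'seen' set by a single sort pass with a composite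
-- (priority-index, key) sort key: idiomatic, same O(n log n) cost, no speed claim.

-- module constant ROUND_ORDER (shared by both Pythons)
def pvRoundOrder : List String := ["opening", "rebuttal", "closing", "no_stop", "unknown"]

-- ===== PORT A =====
def order_keys (counter : List (String × Int)) : List String :=
  let d : PySem.Dict String Int := PySem.Dict.ofList counter
  let st := pvRoundOrder.foldl
    (fun (acc : PySem.Set String × List String) key =>
      match d.get? key with                              -- counter.get(key): None when absent
      | some v => if v ≠ 0 then (PySem.Set.add acc.1 key, acc.2 ++ [key]) else acc
      | none => acc)
    (PySem.Set.empty, [])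
  (PySem.List.sorted d.keys (fun k => k) false).foldl    -- sorted(counter) iterates the keys
    (fun out key => if PySem.Set.contains st.1 key then out else out ++ [key]) st.2

-- ===== PORT B =====
def order_keys_alt (counter : List (String × Int)) : List String :=
  let d : PySem.Dict String Int := PySem.Dict.ofList counter
  let idx : PySem.Dict String Nat := PySem.Dict.ofList pvRoundOrder.zipIdx  -- {k: i for i, k in enumerate(ROUND_ORDER)}
  PySem.List.sorted2 d.keys
    -- tuple key (idx[k] if k in idx and counter[k] else len(ROUND_ORDER), k);
    -- counter[k] is ported as (d.get? k).getD 0: k ranges over d's keys, so get? is some there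
    (fun k => if idx.contains k && ((d.get? k).getD 0 != 0) then idx.getD k pvRoundOrder.length else pvRoundOrder.length)
    (fun k => k) false

-- ===== PRECONDITION & SPEC =====
def Spec_order_keys (counter : List (String × Int)) (out : List String) : Prop := out = order_keys_alt counter
instance (counter : List (String × Int)) (out : List String) : Decidable (Spec_order_keys counter out) := by unfold Spec_order_keys; infer_instance

-- ===== CLAIM (what is proved, stated in full; the proofs are below) =====
def Claim_equal_order_keys : Prop := ∀ (counter : List (String × Int)), Dom_order_keys counter → Spec_order_keys counter (order_keys counter)

-- ===== LEMMAS AND PROOFS =====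

def pvT (d : PySem.Dict String Int) (k : String) : Bool := (d.get? k).getD 0 != 0
def pvIdx (k : String) : Nat := (PySem.Dict.ofList pvRoundOrder.zipIdx).getD k pvRoundOrder.length
def pvG (d : PySem.Dict String Int) (k : String) : Nat :=
  if (PySem.Dict.ofList pvRoundOrder.zipIdx).contains k && ((d.get? k).getD 0 != 0)
  then (PySem.Dict.ofList pvRoundOrder.zipIdx).getD k pvRoundOrder.length
  else pvRoundOrder.length
def pvK (d : PySem.Dict String Int) (k : String) : Lex (Nat × String) := toLex (pvG d k, k)
theorem pvG_eq (d : PySem.Dict String Int) (k : String) :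
    pvG d k = if pvT d k then pvIdx k else pvRoundOrder.length := by
  unfold pvG pvT pvIdx
  by_cases hc : (PySem.Dict.ofList pvRoundOrder.zipIdx).contains k = true
  · simp [hc]
  · have hn : (PySem.Dict.ofList pvRoundOrder.zipIdx).get? k = none := by
      rw [PySem.Dict.get?_eq_none_iff_not_mem_keys]
      rw [PySem.Dict.contains_iff_mem_keys] at hc
      exact hc
    rw [PySem.Dict.getD_of_get?_eq_none _ _ hn]
    simp [hc]
theorem pvT_mem_keys (d : PySem.Dict String Int) (k : String) (h : pvT d k = true) :
    k ∈ d.keys := by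
  by_contra hn
  rw [← PySem.Dict.get?_eq_none_iff_not_mem_keys] at hn
  simp [pvT, hn] at h
theorem pvLoop1 (d : PySem.Dict String Int) (ks : List String) (s : PySem.Set String) (o : List String) :
    ks.foldl
      (fun (acc : PySem.Set String × List String) key =>
        match d.get? key with
        | some v => if v ≠ 0 then (PySem.Set.add acc.1 key, acc.2 ++ [key]) else acc
        | none => acc) (s, o)
    = (PySem.Set.update s (ks.filter (pvT d)), o ++ ks.filter (pvT d)) := by
  induction ks generalizing s o with
  | nil => simp [PySem.Set.update]
  | cons k t ih =>
    have hstep : (match d.get? k with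
        | some v => if v ≠ 0 then (PySem.Set.add s k, o ++ [k]) else (s, o)
        | none => (s, o))
      = (if pvT d k then (PySem.Set.add s k, o ++ [k]) else (s, o)) := by
      unfold pvT
      cases hg : d.get? k with
      | none => simp
      | some v => by_cases hv : v = 0 <;> simp [hv]
    by_cases hT : pvT d k = true
    · simp only [List.foldl_cons, List.filter_cons, hT, if_pos, hstep]
      rw [ih]
      simp [PySem.Set.update, List.append_assoc]
    · simp only [List.foldl_cons, List.filter_cons, hstep, hT]
      simp only [Bool.false_eq_true, if_false, ih]
theorem pvSorted2_lex (xs : List String) (k1 : String → Nat) :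
    PySem.List.sorted2 xs k1 (fun k => k) false
      = PySem.List.sorted xs (fun k => toLex (k1 k, k)) false := by
  have hb : (fun a b : String => decide (k1 a < k1 b) || (!decide (k1 b < k1 a) && decide (a < b)))
      = (fun a b : String => decide (toLex (k1 a, a) < toLex (k1 b, b))) := by
    funext a b
    rw [Bool.eq_iff_iff]
    simp only [Bool.or_eq_true, Bool.and_eq_true, Bool.not_eq_true', decide_eq_true_eq,
      decide_eq_false_iff_not, Prod.Lex.lt_iff, ofLex_toLex]
    constructor
    · rintro (h | ⟨h1, h2⟩)
      · exact Or.inl h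
      · rcases Nat.lt_or_ge (k1 a) (k1 b) with h' | h'
        · exact Or.inl h'
        · exact Or.inr ⟨by omega, h2⟩
    · rintro (h | ⟨h1, h2⟩)
      · exact Or.inl h
      · exact Or.inr ⟨by omega, h2⟩
  rw [PySem.List.sorted_eq_foldl_insertBy]
  unfold PySem.List.sorted2
  simp only [Bool.false_eq_true, reduceIte]
  rw [hb]

theorem order_keys_spec' (counter : List (String × Int)) :
    order_keys counter = order_keys_alt counter := by
  set d : PySem.Dict String Int := PySem.Dict.ofList counter with hd
  set sk : List String := PySem.List.sorted d.keys (fun k => k) false with hsk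
  set P : List String := pvRoundOrder.filter (pvT d) with hP
  set pr : String → Bool := fun k => decide (k ∈ pvRoundOrder) && pvT d k with hpr
  set S : List String := sk.filter (fun k => !pr k) with hS
  -- facts
  have hnodupRO : pvRoundOrder.Nodup := by decide
  have hnodupkeys : d.keys.Nodup := by
    rw [hd]; exact PySem.Dict.nodup_keys_ofList counter
  have hskperm : sk.Perm d.keys := PySem.List.sorted_perm _ _ _
  have hsknodup : sk.Nodup := hskperm.nodup_iff.mpr hnodupkeys
  have hcont : ∀ k, PySem.Set.contains (PySem.Set.update PySem.Set.empty P) k = pr k := by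
    intro k
    have : PySem.Set.update PySem.Set.empty P = PySem.Set.ofList P := by
      rw [PySem.Set.ofList_eq_foldl]; rfl
    rw [this, PySem.Set.contains_eq_decide, Bool.eq_iff_iff, hpr]
    simp [PySem.Set.mem_ofList, hP, List.mem_filter]
  -- A = P ++ S
  have hA : order_keys counter = P ++ S := by
    unfold order_keys
    simp only []
    rw [pvLoop1]
    have hflip : (fun (out : List String) key =>
        if PySem.Set.contains (PySem.Set.update PySem.Set.empty (pvRoundOrder.filter (pvT d)))
            key = true then out else out ++ [key])
        = (fun (out : List String) key => if (!pr key) = true then out ++ [key] else out) := by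
      funext out key
      rw [hcont key]
      cases pr key <;> simp
    rw [hflip, PySem.List.foldl_append_if_eq_filter]
    simp only [hS, hP, hsk, List.nil_append, ← hd]
  -- B = sorted by pvK
  have hB : order_keys_alt counter = PySem.List.sorted d.keys (pvK d) false := by
    show PySem.List.sorted2 d.keys (pvG d) (fun k => k) false = _
    rw [pvSorted2_lex d.keys (pvG d)]
    rfl
  -- membership characterisations
  have hmemP : ∀ k, k ∈ P ↔ (k ∈ pvRoundOrder ∧ pvT d k = true) := by
    intro k; rw [hP]; simp [List.mem_filter]
  have hprT : ∀ k, pr k = true ↔ (k ∈ pvRoundOrder ∧ pvT d k = true) := by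
    intro k; rw [hpr]; simp
  -- Perm
  have hPerm : (P ++ S).Perm d.keys := by
    have hPnodup : P.Nodup := hnodupRO.sublist List.filter_sublist
    have h2 : P.Perm (sk.filter pr) := by
      rw [List.perm_ext_iff_of_nodup hPnodup (hsknodup.filter _)]
      intro a
      rw [hmemP a]
      simp only [List.mem_filter] at *
      constructor
      · rintro ⟨h1, h2⟩
        refine ⟨?_, (hprT a).mpr ⟨h1, h2⟩⟩
        rw [hsk, PySem.List.mem_sorted]
        exact pvT_mem_keys d a h2
      · rintro ⟨_, h2⟩
        exact (hprT a).mp h2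
    exact ((h2.append_right S).trans (List.filter_append_perm pr sk)).trans hskperm
  -- Pairwise
  have hidxlt : ∀ a ∈ pvRoundOrder, pvIdx a < pvRoundOrder.length := by decide
  have hidxout : ∀ a, a ∉ pvRoundOrder → pvIdx a = pvRoundOrder.length := by
    intro a ha
    have hkeysIdx : (PySem.Dict.ofList pvRoundOrder.zipIdx).keys = pvRoundOrder := by decide
    have : (PySem.Dict.ofList pvRoundOrder.zipIdx).get? a = none := by
      rw [PySem.Dict.get?_eq_none_iff_not_mem_keys, hkeysIdx]; exact ha
    unfold pvIdx
    rw [PySem.Dict.getD_of_get?_eq_none _ _ this]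
  have hGS : ∀ a, (!pr a) = true → pvG d a = pvRoundOrder.length := by
    intro a ha
    rw [Bool.not_eq_true'] at ha
    rw [pvG_eq]
    by_cases hT : pvT d a = true
    · have : a ∉ pvRoundOrder := by
        intro hmem
        exact absurd ((hprT a).mpr ⟨hmem, hT⟩) (by simp [ha])
      rw [if_pos hT, hidxout a this]
    · simp [hT]
  have hpair : (P ++ S).Pairwise (fun a b => pvK d a < pvK d b) := by
    rw [List.pairwise_append]
    refine ⟨?_, ?_, ?_⟩
    · -- on P
      have hROpw : pvRoundOrder.Pairwise (fun a b => pvIdx a < pvIdx b) := by decide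
      refine (hROpw.filter (pvT d)).imp_of_mem ?_
      intro a b ha hb hlt
      have hTa := ((hmemP a).mp (hP ▸ ha)).2
      have hTb := ((hmemP b).mp (hP ▸ hb)).2
      unfold pvK
      rw [pvG_eq, pvG_eq, if_pos hTa, if_pos hTb, Prod.Lex.lt_iff]
      exact Or.inl (by simpa using hlt)
    · -- on S
      have hle : sk.Pairwise (fun a b : String => a ≤ b) := by
        have := PySem.List.sorted_pairwise d.keys (fun k : String => k)
        simpa [hsk] using this
      have hlt : sk.Pairwise (fun a b : String => a < b) :=
        (hle.and hsknodup).imp (fun h => lt_of_le_of_ne h.1 h.2)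
      refine ((hlt.filter (fun k => !pr k)).imp_of_mem ?_)
      intro a b ha hb hab
      have hqa : (!pr a) = true := (List.mem_filter.mp ha).2
      have hqb : (!pr b) = true := (List.mem_filter.mp hb).2
      unfold pvK
      rw [hGS a hqa, hGS b hqb, Prod.Lex.lt_iff]
      exact Or.inr ⟨rfl, hab⟩
    · -- cross
      intro a ha b hb
      have hTa := (hmemP a).mp (hP ▸ ha)
      have hqb : (!pr b) = true := (List.mem_filter.mp hb).2
      unfold pvK
      rw [pvG_eq, if_pos hTa.2, hGS b hqb, Prod.Lex.lt_iff, ofLex_toLex]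
      exact Or.inl (hidxlt a hTa.1)
  rw [hA, hB]
  exact (PySem.List.sorted_eq_of_perm_of_pairwise_lt d.keys (P ++ S) (pvK d) hPerm hpair).symm

-- ===== VERDICT (by name: the statement is the Claim_ definition above) =====
theorem order_keys_spec : Claim_equal_order_keys := by
  intro counter _
  exact order_keys_spec' counter
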